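-- pv_equiv track=rewrite | github.com/shashwat22473/codeforces-solution | 1790C.py | check
-- ===== SOURCE A (Python) =====
-- def check(a):
--     d={}
--     for i in a :
--         if len(i)!=0:
--             if i[0] not in d:
--                 d[i[0]]=0
--             d[i[0]]+=1
--     a=list(d.keys())[list(d.values()).index(max(list(d.values())))]
--     return(a)
-- ===== SOURCE B (Python) =====
-- def check(a):
--     firsts = [s[0] for s in a if len(s) != 0]
--     t = sorted(firsts)
--     best_len = 0
--     winners = []
--     j = 0
--     while j < len(t):
--         k = j
--         while k < len(t) and t[k] == t[j]:
--             k += 1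
--         if k - j > best_len:
--             best_len = k - j
--             winners = [t[j]]
--         elif k - j == best_len:
--             winners.append(t[j])
--         j = k
--     for c in firsts:
--         if c in winners:
--             return c
-- ===== Notes on version B (the rewrite author's own statement) =====
-- stated objective: alternative
-- what changed: B replaces A's count dictionary and values.index argmax by sort-then-scan: it sorts the leading characters, scans the contiguous runs to find the maximal run length and the set of characters attaining it, and returns the first leading character that is in that set (same first-occurrence tie-break).
-- outside the precondition, e.g. on check([]): A raises ValueError, B returns None; on check(['', '']): A raises ValueError, B returns None
import Mathlib
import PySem

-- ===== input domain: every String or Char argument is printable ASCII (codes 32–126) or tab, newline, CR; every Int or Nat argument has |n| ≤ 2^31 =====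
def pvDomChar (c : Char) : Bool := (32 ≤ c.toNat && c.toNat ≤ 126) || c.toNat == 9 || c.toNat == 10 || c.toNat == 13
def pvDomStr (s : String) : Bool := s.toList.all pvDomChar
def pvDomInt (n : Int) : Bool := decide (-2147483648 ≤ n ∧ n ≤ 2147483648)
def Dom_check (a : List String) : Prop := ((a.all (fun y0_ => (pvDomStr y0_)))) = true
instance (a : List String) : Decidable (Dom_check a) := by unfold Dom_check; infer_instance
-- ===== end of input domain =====

-- B replaces A's count dictionary + values.index argmax by sort-then-run-scan over the
-- leading characters; same first-occurrence tie-break, an alternative algorithm.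

-- ===== PORT A =====
-- loop body: if len(i)!=0: if i[0] not in d: d[i[0]]=0 ; d[i[0]]+=1
def checkStep (d : PySem.Dict Char Int) (i : String) : PySem.Dict Char Int :=
  match i.toList with
  | [] => d
  | c :: _ =>
    let d1 := if d.contains c then d else d.insert c (0 : Int)
    d1.modify c 0 (· + 1)

def check (a : List String) : String :=
  let d := a.foldl checkStep PySem.Dict.empty
  -- a = list(d.keys())[list(d.values()).index(max(list(d.values())))]
  -- (max of an empty values list raises ValueError → outside Pre_; "" stands for that arm)
  match PySem.List.max? d.values (fun v => v) with
  | none => ""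
  | some m =>
    match PySem.List.index? d.values m with
    | none => ""
    | some idx =>
      match PySem.List.pyGet? d.keys (idx : Int) with
      | none => ""
      | some c => String.mk [c]

-- ===== PORT B =====
-- the two nested while loops of Source B: the outer loop walks run by run (j := k jumps over
-- the run), the inner while 't[k] == t[j]' is the takeWhile; (best_len, winners) is the state
def runScan : List Char → Int → List Char → Int × List Char
  | [], bl, ws => (bl, ws)
  | c :: rest, bl, ws =>
    let run := rest.takeWhile (fun x => x == c)
    let l : Int := 1 + run.length
    if bl < l then runScan (rest.drop run.length) l [c]
    else if l == bl then runScan (rest.drop run.length) bl (ws ++ [c])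
    else runScan (rest.drop run.length) bl ws
termination_by t _ _ => t.length
decreasing_by all_goals simp [List.length_drop]

def check_alt (a : List String) : String :=
  let firsts := a.filterMap (fun s => s.toList.head?)
  let t := PySem.List.sorted firsts (fun c => c) false
  let r := runScan t 0 []
  -- for c in firsts: if c in winners: return c   (falling off the loop returns None → outside Pre_)
  match firsts.find? (fun c => r.2.contains c) with
  | some c => String.mk [c]
  | none => ""

-- ===== PRECONDITION & SPEC =====
-- Pre_ excludes exactly the inputs with no nonempty string: there A raises ValueError (max() of
-- an empty sequence) and B falls off its final loop returning None (not a str).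
def Pre_check (a : List String) : Prop := ∃ s ∈ a, s.toList ≠ []
instance (a : List String) : Decidable (Pre_check a) := by unfold Pre_check; infer_instance
def pvWitness_check : List String := ["ab", "b", "ax"]
def Spec_check (a : List String) (out : String) : Prop := out = check_alt a
instance (a : List String) (out : String) : Decidable (Spec_check a out) := by unfold Spec_check; infer_instance

-- ===== CLAIM (what is proved, stated in full; the proofs are below) =====
def Claim_equal_check : Prop := ∀ (a : List String), Dom_check a → Pre_check a → Spec_check a (check a)

-- ===== LEMMAS AND PROOFS =====

-- ---------- A-side: the dict loop is a counter, A's pick is a find? over the distinct chars ----------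

-- A's loop body, written as a single counting insert
theorem checkStep_eq (d : PySem.Dict Char Int) (i : String) :
    checkStep d i = match i.toList with
      | [] => d
      | c :: _ => d.insert c (d.getD c 0 + 1) := by
  unfold checkStep
  cases h : i.toList with
  | nil => rfl
  | cons c rest =>
    simp only
    by_cases hc : d.contains c
    · simp [hc, PySem.Dict.modify.eq_1]
    · simp only [Bool.not_eq_true] at hc
      simp [hc, PySem.Dict.modify.eq_1, PySem.Dict.insert_insert_self,
        PySem.Dict.getD_of_not_contains d 0 hc]

-- A's loop over the strings is the counting loop over the leading characters
theorem fold_eq_counter (a : List String) (d : PySem.Dict Char Int) :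
    a.foldl checkStep d
      = (a.filterMap (fun s => s.toList.head?)).foldl
          (fun d x => d.insert x (d.getD x 0 + 1)) d := by
  induction a generalizing d with
  | nil => rfl
  | cons s t ih =>
    simp only [List.foldl_cons, List.filterMap_cons]
    rw [checkStep_eq]
    cases h : s.toList with
    | nil => simp [ih]
    | cons c rest => simp [ih]

-- find? ignores a removed element that fails the predicate
theorem find?_discard {α : Type} [BEq α] [LawfulBEq α] (p : α → Bool) (x : α) (hx : p x = false)
    (s : List α) : List.find? p (PySem.Set.discard s x) = List.find? p s := by
  induction s with
  | nil => simp [PySem.Set.discard.eq_1]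
  | cons y t ih =>
    rw [PySem.Set.discard.eq_1] at ih ⊢
    by_cases hyx : y = x
    · subst hyx; simp [List.filter, hx, ih]
    · simp only [List.filter_cons]
      have : (!y == x) = true := by simp [hyx]
      rw [this]
      cases hpy : p y <;> simp [hpy, ih]

-- the first match in the ordered dedup is the first match in the original list
theorem find?_ofList {α : Type} [BEq α] [LawfulBEq α] (p : α → Bool) (xs : List α) :
    List.find? p (PySem.Set.ofList xs) = List.find? p xs := by
  induction xs with
  | nil => simp [PySem.Set.ofList_nil]
  | cons x t ih =>
    rw [PySem.Set.ofList_cons]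
    cases hpx : p x
    · simp only [List.find?_cons, hpx, find?_discard p x hpx, ih]
    · simp [hpx]

theorem find_of_decomp {α : Type} (p : α → Bool) (pre suf : List α) (m : α)
    (hpre : ∀ y ∈ pre, p y = false) (hm : p m = true) :
    List.find? p (pre ++ m :: suf) = some m := by
  induction pre with
  | nil => simp [hm]
  | cons z t ih =>
    simp only [List.cons_append, List.find?_cons, hpre z (by simp)]
    exact ih (fun y hy => hpre y (by simp [hy]))

-- find? only looks at the values of the predicate on members
theorem find?_congr_mem {α : Type} (p q : α → Bool) (xs : List α)
    (h : ∀ x ∈ xs, p x = q x) : xs.find? p = xs.find? q := by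
  induction xs with
  | nil => rfl
  | cons x t ih =>
    simp only [List.find?_cons, h x (by simp)]
    cases q x
    · exact ih (fun y hy => h y (by simp [hy]))
    · rfl

-- ---------- B-side: the run scan over the sorted list ----------

-- proof-side view of the runs of a list: (first char of the run, its length)
def runsOf : List Char → List (Char × Int)
  | [] => []
  | c :: rest =>
    (c, 1 + ((rest.takeWhile (fun x => x == c)).length : Int)) ::
      runsOf (rest.drop (rest.takeWhile (fun x => x == c)).length)
termination_by t => t.length
decreasing_by simp [List.length_drop]

-- one step of Source B's outer loop on the (best_len, winners) state
def stepRW (s : Int × List Char) (p : Char × Int) : Int × List Char :=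
  if s.1 < p.2 then (p.2, [p.1])
  else if p.2 == s.1 then (s.1, s.2 ++ [p.1])
  else s

def maxRun (L : List (Char × Int)) (b : Int) : Int := L.foldl (fun m p => max m p.2) b

theorem runScan_eq_foldl : ∀ (t : List Char) (bl : Int) (ws : List Char),
    runScan t bl ws = (runsOf t).foldl stepRW (bl, ws) := by
  intro t
  induction t using runsOf.induct with
  | case1 => intro bl ws; simp [runScan, runsOf]
  | case2 c rest ih =>
    intro bl ws
    have hstep : ∀ (s : Int × List Char) (p : Char × Int),
        stepRW s p = if s.1 < p.2 then (p.2, [p.1])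
          else if p.2 == s.1 then (s.1, s.2 ++ [p.1]) else s := fun _ _ => rfl
    simp only [runScan, runsOf, List.foldl_cons, hstep]
    split_ifs with h1 h2
    · exact ih _ _
    · exact ih _ _
    · exact ih _ _

theorem le_maxRun (L : List (Char × Int)) (b : Int) :
    b ≤ maxRun L b ∧ ∀ p ∈ L, p.2 ≤ maxRun L b := by
  unfold maxRun
  constructor
  · exact (PySem.List.le_foldl_max_int L (fun p => p.2) b).1
  · exact (PySem.List.le_foldl_max_int L (fun p => p.2) b).2

theorem maxRun_eq_of_all_le (L : List (Char × Int)) (b : Int)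
    (h : ∀ p ∈ L, p.2 ≤ b) : maxRun L b = b := by
  induction L generalizing b with
  | nil => rfl
  | cons p t ih =>
    unfold maxRun at *
    simp only [List.foldl_cons]
    rw [max_eq_left (h p (by simp))]
    exact ih b (fun q hq => h q (by simp [hq]))

theorem maxRun_mem (L : List (Char × Int)) (b : Int) :
    maxRun L b = b ∨ ∃ p ∈ L, p.2 = maxRun L b := by
  induction L generalizing b with
  | nil => left; rfl
  | cons p t ih =>
    unfold maxRun at *
    simp only [List.foldl_cons]
    rcases ih (max b p.2) with h | ⟨q, hq, hq2⟩
    · rw [h]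
      rcases le_or_gt p.2 b with hle | hgt
      · left; exact max_eq_left hle
      · right; exact ⟨p, by simp, (max_eq_right hgt.le).symm⟩
    · right; exact ⟨q, by simp [hq], hq2⟩

-- the outer loop computes the max run length and collects the runs attaining it
theorem foldl_stepRW_spec (L : List (Char × Int)) : ∀ (bl : Int) (ws : List Char),
    L.foldl stepRW (bl, ws) =
      (maxRun L bl,
       (if L.all (fun p => p.2 ≤ bl) then ws else []) ++
         (L.filter (fun p => p.2 == maxRun L bl)).map Prod.fst) := by
  induction L with
  | nil => intro bl ws; simp [maxRun]
  | cons p t ih =>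
    intro bl ws
    have hmax : maxRun (p :: t) bl = maxRun t (max bl p.2) := by
      simp [maxRun]
    have hstep : stepRW (bl, ws) p =
        if bl < p.2 then (p.2, [p.1]) else if p.2 == bl then (bl, ws ++ [p.1]) else (bl, ws) := rfl
    rw [List.foldl_cons, hstep]
    rcases lt_trichotomy bl p.2 with hlt | heq | hgt
    · rw [if_pos hlt, ih]
      have hmb : max bl p.2 = p.2 := max_eq_right hlt.le
      by_cases hall : ∀ q ∈ t, q.2 ≤ p.2
      · have hMt : maxRun t p.2 = p.2 := maxRun_eq_of_all_le t p.2 hall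
        have hM : maxRun (p :: t) bl = p.2 := by rw [hmax, hmb, hMt]
        have hallb : (p :: t).all (fun q => decide (q.2 ≤ bl)) = false := by
          simp only [List.all_cons, Bool.and_eq_false_iff]
          left; simp; omega
        have hta : t.all (fun q => decide (q.2 ≤ p.2)) = true := by
          simp only [List.all_eq_true]; intro q hq; simpa using hall q hq
        rw [hmax, hmb, hallb, hta]
        simp only [if_true, Bool.false_eq_true, if_false, List.filter_cons, hMt]
        simp
      · have hex : ∃ q ∈ t, p.2 < q.2 := by
          simp only [not_forall, not_le, exists_prop] at hall
          obtain ⟨q, hq, hq2⟩ := hall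
          exact ⟨q, hq, by omega⟩
        obtain ⟨q, hq, hq2⟩ := hex
        have hMgt : p.2 < maxRun t p.2 := lt_of_lt_of_le hq2 ((le_maxRun t p.2).2 q hq)
        have hallb : (p :: t).all (fun q => decide (q.2 ≤ bl)) = false := by
          simp only [List.all_cons, Bool.and_eq_false_iff]
          left; simp; omega
        have hpf : (p.2 == maxRun t p.2) = false := by simp; omega
        have hta' : (t.all fun q => decide (q.2 ≤ p.2)) = false := by
          rw [List.all_eq_false]
          exact ⟨q, hq, by simp; omega⟩
        rw [hmax, hmb, hallb, hta']
        simp only [Bool.false_eq_true, if_false, List.filter_cons, hpf]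
    · rw [if_neg (by omega), if_pos (by simp [heq]), ih]
      have hmb : max bl p.2 = bl := by omega
      by_cases hall : ∀ q ∈ t, q.2 ≤ bl
      · have hMt : maxRun t bl = bl := maxRun_eq_of_all_le t bl hall
        have h1 : (p :: t).all (fun q => decide (q.2 ≤ bl)) = true := by
          simp only [List.all_eq_true]
          intro q hq
          rcases List.mem_cons.mp hq with rfl | hq'
          · simp; omega
          · simpa using hall q hq'
        have h2 : t.all (fun q => decide (q.2 ≤ bl)) = true := by
          simp only [List.all_eq_true]; intro q hq; simpa using hall q hq
        have hpt : (p.2 == maxRun t bl) = true := by simp [hMt]; omega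
        rw [hmax, hmb, h1, h2]
        simp only [if_true, List.filter_cons, hpt]
        simp
      · have hex : ∃ q ∈ t, bl < q.2 := by
          simp only [not_forall, not_le, exists_prop] at hall
          obtain ⟨q, hq, hq2⟩ := hall
          exact ⟨q, hq, by omega⟩
        obtain ⟨q, hq, hq2⟩ := hex
        have hMgt : bl < maxRun t bl := lt_of_lt_of_le hq2 ((le_maxRun t bl).2 q hq)
        have h1 : (p :: t).all (fun q => decide (q.2 ≤ bl)) = t.all (fun q => decide (q.2 ≤ bl)) := by
          simp only [List.all_cons]
          have : decide (p.2 ≤ bl) = true := by simp; omega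
          rw [this, Bool.true_and]
        have h2 : t.all (fun q => decide (q.2 ≤ bl)) = false := by
          rw [List.all_eq_false]
          exact ⟨q, hq, by simp; omega⟩
        have hpf : (p.2 == maxRun t bl) = false := by simp; omega
        rw [hmax, hmb, h1, h2]
        simp only [Bool.false_eq_true, if_false, List.filter_cons, hpf]
    · rw [if_neg (by omega), if_neg (by simp; omega), ih]
      have hmb : max bl p.2 = bl := max_eq_left hgt.le
      have hMge : bl ≤ maxRun t bl := (le_maxRun t bl).1
      have hpf : (p.2 == maxRun t bl) = false := by simp; omega
      have h1 : (p :: t).all (fun q => decide (q.2 ≤ bl)) = t.all (fun q => decide (q.2 ≤ bl)) := by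
        simp only [List.all_cons]
        have : decide (p.2 ≤ bl) = true := by simp; omega
        rw [this, Bool.true_and]
      rw [hmax, hmb, h1]
      simp [hpf]

-- on a sorted list the runs are exactly the distinct chars with their counts
theorem runsOf_spec (t : List Char) (hs : t.Pairwise (· ≤ ·)) :
    (∀ p ∈ runsOf t, p.1 ∈ t ∧ p.2 = (t.count p.1 : Int)) ∧
      (∀ c ∈ t, (c, (t.count c : Int)) ∈ runsOf t) := by
  induction t using runsOf.induct with
  | case1 => simp [runsOf]
  | case2 c rest ih =>
    have hdw0 : rest.drop (rest.takeWhile (fun x => x == c)).length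
        = rest.dropWhile (fun x => x == c) := by
      have h := List.drop_left' (l₁ := rest.takeWhile (fun x => x == c))
        (l₂ := rest.dropWhile (fun x => x == c))
        (i := (rest.takeWhile (fun x => x == c)).length) rfl
      rwa [List.takeWhile_append_dropWhile] at h
    have hdecomp : rest.takeWhile (fun x => x == c) ++
        rest.drop (rest.takeWhile (fun x => x == c)).length = rest := by
      rw [hdw0]
      exact List.takeWhile_append_dropWhile
    set tw := rest.takeWhile (fun x => x == c) with htw
    set rest' := rest.drop tw.length with hrest'
    have htwc : ∀ x ∈ tw, x = c := by
      intro x hx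
      have := List.mem_takeWhile_imp hx
      simpa using this
    -- every element of rest' differs from c
    have hrestle : ∀ x ∈ rest, c ≤ x := by
      intro x hx
      exact (List.pairwise_cons.mp hs).1 x hx
    have hrest'ne : ∀ x ∈ rest', x ≠ c := by
      have hdw : rest' = rest.dropWhile (fun x => x == c) := hdw0
      intro x hx
      rw [hdw] at hx
      cases hd : rest.dropWhile (fun x => x == c) with
      | nil => rw [hd] at hx; simp at hx
      | cons h0 tl =>
        have hh0' : (h0 == c) = false := by
          have := List.head?_dropWhile_not (fun x => x == c) rest
          rw [hd] at this
          exact this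
        have hh0 : ¬ (h0 == c) = true := by simp [hh0']
        have hh0mem : h0 ∈ rest :=
          List.Sublist.mem (List.mem_cons_self ..)
            (by rw [← hd]; exact List.dropWhile_sublist _)
        have hch0 : c < h0 := lt_of_le_of_ne (hrestle h0 hh0mem)
          (fun h => by simp [← h] at hh0')
        rw [hd] at hx
        have hpw : (h0 :: tl).Pairwise (· ≤ ·) := by
          have hsub : (h0 :: tl).Sublist rest := by
            rw [← hd]; exact List.dropWhile_sublist _
          exact ((List.pairwise_cons.mp hs).2).sublist hsub
        rcases List.mem_cons.mp hx with rfl | hx'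
        · exact fun h => absurd h (by intro h; subst h; exact lt_irrefl _ hch0)
        · have : h0 ≤ x := (List.pairwise_cons.mp hpw).1 x hx'
          intro h; subst h; exact absurd (lt_of_lt_of_le hch0 this) (lt_irrefl _)
    have hcount : (c :: rest).count c = 1 + tw.length := by
      have h1 : rest.count c = tw.count c + rest'.count c := by
        conv_lhs => rw [← hdecomp]
        exact List.count_append ..
      have h2 : tw.count c = tw.length := by
        rw [List.count_eq_length]
        intro x hx; simp [htwc x hx]
      have h3 : rest'.count c = 0 := by
        rw [List.count_eq_zero]
        intro hmem; exact hrest'ne c hmem rfl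
      rw [List.count_cons_self, h1, h2, h3]; omega
    have hcount_ne : ∀ x, x ≠ c → (c :: rest).count x = rest'.count x := by
      intro x hx
      have h1 : rest.count x = tw.count x + rest'.count x := by
        conv_lhs => rw [← hdecomp]
        exact List.count_append ..
      have h2 : tw.count x = 0 := by
        rw [List.count_eq_zero]
        intro hmem; exact hx (htwc x hmem)
      rw [List.count_cons_of_ne (Ne.symm hx), h1, h2]; omega
    have hpw' : rest'.Pairwise (· ≤ ·) := by
      have hsub : rest'.Sublist rest := by rw [hrest']; exact List.drop_sublist ..
      exact ((List.pairwise_cons.mp hs).2).sublist hsub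
    obtain ⟨ihs, ihc⟩ := ih hpw'
    constructor
    · intro p hp
      rw [runsOf] at hp
      rcases List.mem_cons.mp hp with rfl | hp'
      · refine ⟨by simp, ?_⟩
        simp only [hcount]; push_cast; ring
      · obtain ⟨hmem, hcnt⟩ := ihs p hp'
        have hne : p.1 ≠ c := hrest'ne p.1 hmem
        refine ⟨?_, ?_⟩
        · have : p.1 ∈ rest := by
            have : rest'.Sublist rest := by rw [hrest']; exact List.drop_sublist ..
            exact this.mem hmem
          simp [this]
        · rw [hcnt, hcount_ne p.1 hne]
    · intro x hx
      by_cases hxc : x = c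
      · subst hxc
        rw [runsOf, ← htw, ← hrest']
        have hxx : (((x :: rest).count x : Int)) = 1 + (tw.length : Int) := by
          rw [hcount]; push_cast; ring
        rw [hxx]
        exact List.mem_cons_self ..
      · have hxrest : x ∈ rest := by
          rcases List.mem_cons.mp hx with rfl | h
          · exact absurd rfl hxc
          · exact h
        have hxrest' : x ∈ rest' := by
          have : x ∈ tw ∨ x ∈ rest' := by
            rw [← List.mem_append, hdecomp]; exact hxrest
          rcases this with h | h
          · exact absurd (htwc x h) hxc
          · exact h
        rw [runsOf, ← htw, ← hrest']
        refine List.mem_cons.mpr (Or.inr ?_)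
        rw [hcount_ne x hxc]
        exact ihc x hxrest'

-- ---------- main equivalence ----------

theorem check_main (a : List String) (hpre : ∃ s ∈ a, s.toList ≠ []) : check a = check_alt a := by
  set firsts := a.filterMap (fun s => s.toList.head?) with hfirsts
  have hfne : firsts ≠ [] := by
    obtain ⟨s, hs, hsne⟩ := hpre
    cases hcs : s.toList with
    | nil => exact absurd hcs hsne
    | cons c rest =>
      have : c ∈ firsts := List.mem_filterMap.mpr ⟨s, hs, by simp [hcs]⟩
      exact List.ne_nil_of_mem this
  -- ===== A side =====
  have hd : a.foldl checkStep PySem.Dict.empty = PySem.Dict.counter firsts := by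
    rw [fold_eq_counter, ← hfirsts, PySem.Dict.foldl_insert_getD_add_one_eq_counter]
  set d := PySem.Dict.counter firsts with hdm
  set keys := PySem.Set.ofList firsts with hkeys
  have hknd : d.keys.Nodup := PySem.Dict.nodup_keys_counter firsts
  have hkeyseq : d.keys = keys := PySem.Dict.keys_counter firsts
  have hvals : d.values = keys.map (fun k => ((firsts.count k : Int))) := by
    rw [PySem.Dict.values_eq_map_keys d hknd 0, hkeyseq]
    exact List.map_congr_left (fun k _ => PySem.Dict.getD_counter firsts k)
  have hkne : keys ≠ [] := by
    have := PySem.Set.mem_ofList firsts (firsts.head hfne)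
    exact List.ne_nil_of_mem (this.mpr (List.head_mem hfne))
  have hvne : d.values ≠ [] := by
    rw [hvals]; simpa using hkne
  obtain ⟨m, hm⟩ : ∃ m, PySem.List.max? d.values (fun v => v) = some m := by
    cases h : PySem.List.max? d.values (fun v => v) with
    | none => exact absurd ((PySem.List.max?_eq_none_iff _ _).mp h) hvne
    | some m => exact ⟨m, rfl⟩
  have hmmax : ∀ v ∈ d.values, v ≤ m := fun v hv => PySem.List.max?_isMax hm v hv
  have hmmem : m ∈ d.values := PySem.List.max?_mem hm
  -- A: values.index(max), keys[idx]
  obtain ⟨idx, hidx⟩ : ∃ idx, PySem.List.index? d.values m = some idx := by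
    cases h : PySem.List.index? d.values m with
    | none => exact absurd ((PySem.List.index?_eq_none_iff _ _).mp h) (by simp [hmmem])
    | some idx => exact ⟨idx, rfl⟩
  obtain ⟨pre, suf, hdec, hlen, hnotpre⟩ := (PySem.List.index?_eq_some_iff d.values m idx).mp hidx
  rw [hvals] at hdec
  obtain ⟨s₁, s₂, hks, hmap1, hmap2⟩ := List.map_eq_append_iff.mp hdec
  obtain ⟨k, s₂', hs₂, hkm, hmap2'⟩ := List.map_eq_cons_iff.mp hmap2
  have hget : PySem.List.pyGet? d.keys (idx : Int) = some k := by
    rw [PySem.List.pyGet?_natCast, hkeyseq, hks, hs₂, ← hlen, ← hmap1, List.length_map,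
      List.getElem?_append_right (le_refl _)]
    simp
  -- A's pick is the first key with maximal count
  set p : Char → Bool := fun y => decide (m ≤ (firsts.count y : Int)) with hp
  have hfindA : keys.find? p = some k := by
    rw [hks, hs₂]
    apply find_of_decomp
    · intro y hy
      have hyv : ((firsts.count y : Int)) ∈ pre := by
        rw [← hmap1]; exact List.mem_map.mpr ⟨y, hy, rfl⟩
      have hne : ((firsts.count y : Int)) ≠ m := fun h => hnotpre (h ▸ hyv)
      have hle : ((firsts.count y : Int)) ≤ m := by
        apply hmmax; rw [hvals, hks, hs₂]
        exact List.mem_map.mpr ⟨y, by simp [hy], rfl⟩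
      simp [hp]
      omega
    · simp [hp, ← hkm]
  have hfindA' : firsts.find? p = some k := by
    rw [← find?_ofList, ← hkeys, hfindA]
  -- ===== B side =====
  set t := PySem.List.sorted firsts (fun c => c) false with ht
  have htperm : t.Perm firsts := PySem.List.sorted_perm ..
  have htpw : t.Pairwise (· ≤ ·) := PySem.List.sorted_pairwise ..
  obtain ⟨hruns_sound, hruns_complete⟩ := runsOf_spec t htpw
  have hcount_t : ∀ c, t.count c = firsts.count c := fun c => htperm.count_eq c
  have hmem_t : ∀ c, c ∈ t ↔ c ∈ firsts := fun c => htperm.mem_iff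
  -- run the scan
  have hscan : runScan t 0 [] =
      (maxRun (runsOf t) 0,
        ((runsOf t).filter (fun q => q.2 == maxRun (runsOf t) 0)).map Prod.fst) := by
    rw [runScan_eq_foldl, foldl_stepRW_spec]
    congr 1
    rw [ite_self]
    simp
  set M := maxRun (runsOf t) 0 with hM
  set winners := ((runsOf t).filter (fun q => q.2 == M)).map Prod.fst with hws
  -- winners membership ↔ maximal count
  have hwin : ∀ c, c ∈ winners ↔ c ∈ firsts ∧ (firsts.count c : Int) = M := by
    intro c
    constructor
    · intro hc
      obtain ⟨q, hq, hq1⟩ := List.mem_map.mp hc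
      obtain ⟨hqmem, hqM⟩ := List.mem_filter.mp hq
      obtain ⟨hq1t, hq2⟩ := hruns_sound q hqmem
      have : q.2 = M := by simpa using hqM
      subst hq1
      exact ⟨(hmem_t q.1).mp hq1t, by rw [← hcount_t, ← hq2, this]⟩
    · rintro ⟨hcf, hcM⟩
      have hct : c ∈ t := (hmem_t c).mpr hcf
      have hmem : (c, (t.count c : Int)) ∈ runsOf t := hruns_complete c hct
      apply List.mem_map.mpr
      refine ⟨(c, (t.count c : Int)), List.mem_filter.mpr ⟨hmem, ?_⟩, rfl⟩
      simp only [beq_iff_eq]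
      rw [hcount_t]; exact hcM
  -- M = m : both are the maximum of the same multiset of counts
  have hMm : M = m := by
    apply le_antisymm
    · -- M ≤ m : M is attained by some run, whose count is in d.values
      rcases maxRun_mem (runsOf t) 0 with h0 | ⟨q, hq, hq2⟩
      · -- M = 0 impossible: t nonempty, head run has length ≥ 1 ≤ M
        exfalso
        have htne : t ≠ [] := by
          rw [ht, Ne, PySem.List.sorted_eq_nil_iff]; exact hfne
        cases hteq : t with
        | nil => exact htne hteq
        | cons c0 rest =>
          have hhead : (c0, 1 + ((rest.takeWhile (fun x => x == c0)).length : Int)) ∈ runsOf t := by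
            rw [hteq, runsOf]; simp
          have := (le_maxRun (runsOf t) 0).2 _ hhead
          rw [← hM] at this
          simp only at this
          have hM0 : maxRun (runsOf t) 0 = 0 := h0
          rw [← hM] at hM0
          omega
      · obtain ⟨hq1t, hq2c⟩ := hruns_sound q hq
        have : (firsts.count q.1 : Int) ∈ d.values := by
          rw [hvals]
          exact List.mem_map.mpr ⟨q.1, (PySem.Set.mem_ofList ..).mpr ((hmem_t q.1).mp hq1t), rfl⟩
        have hle := hmmax _ this
        rw [hM, ← hq2, hq2c, hcount_t]
        exact hle
    · -- m ≤ M : m is a count of some key, every count is ≤ M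
      rw [hvals] at hmmem
      obtain ⟨k0, hk0, hk0m⟩ := List.mem_map.mp hmmem
      have hk0f : k0 ∈ firsts := (PySem.Set.mem_ofList ..).mp hk0
      have hmem : (k0, (t.count k0 : Int)) ∈ runsOf t := hruns_complete k0 ((hmem_t k0).mpr hk0f)
      have := (le_maxRun (runsOf t) 0).2 _ hmem
      rw [← hM] at this
      simp only at this
      rw [← hk0m, ← hcount_t k0]
      exact this
  -- the two find? predicates agree on members of firsts
  have hpq : ∀ y ∈ firsts, p y = winners.contains y := by
    intro y hy
    have hyle : (firsts.count y : Int) ≤ m := by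
      apply hmmax
      rw [hvals]
      exact List.mem_map.mpr ⟨y, (PySem.Set.mem_ofList ..).mpr hy, rfl⟩
    by_cases hcy : (firsts.count y : Int) = m
    · have h1 : p y = true := by simp [hp]; omega
      have h2 : y ∈ winners := (hwin y).mpr ⟨hy, by rw [hcy, hMm]⟩
      rw [h1, List.contains_iff_mem.mpr h2]
    · have h1 : p y = false := by simp [hp]; omega
      have h2 : y ∉ winners := by
        intro hmem
        exact hcy (by rw [((hwin y).mp hmem).2, hMm])
      rw [h1]
      cases hcon : winners.contains y
      · rfl
      · exact absurd (List.contains_iff_mem.mp hcon) h2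
  have hfindB : firsts.find? (fun c => winners.contains c) = some k := by
    rw [← find?_congr_mem p _ firsts hpq, hfindA']
  -- assemble
  show check a = check_alt a
  unfold check check_alt
  simp only [← hfirsts, hd, hm, hidx, hget, ← ht, hscan, hfindB]

-- ===== VERDICT (by name: the statement is the Claim_ definition above) =====
theorem check_spec : Claim_equal_check := by
  intro a _ hpre
  unfold Spec_check
  exact check_main a hpre
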